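-- pv_equiv track=rewrite | github.com/mrallen29/iqvia-daily-task-generator | run_app.py | normalize_frequency_string
-- ===== SOURCE A (Python) =====
-- FREQUENCY_ORDER = ['Daily', 'Weekly', 'Monthly']
--
-- def normalize_frequency_string(freq_str: str):
--     """Return (freq_list, display_str). Accepts separators: ',', '+', '&', '|', '/'."""
--     raw = (freq_str or '').strip()
--     if not raw:
--         return [], ''
--     tmp = raw
--     for sep in ['+', '&', '|', '/']:
--         tmp = tmp.replace(sep, ',')
--     parts = [p.strip() for p in tmp.split(',') if p.strip()]
--     mapped = []
--     for p in parts: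
--         key = p.replace(' ', '').upper()
--         if key in ('D','DAILY'):
--             mapped.append('Daily')
--         elif key in ('W','WEEKLY'):
--             mapped.append('Weekly')
--         elif key in ('M','MONTHLY'):
--             mapped.append('Monthly')
--         else:
--             mapped.append(p.title())
--     seen=set(); dedup=[]
--     for item in mapped:
--         if item not in seen:
--             seen.add(item); dedup.append(item)
--     ordered = [f for f in FREQUENCY_ORDER if f in dedup] + [f for f in dedup if f not in FREQUENCY_ORDER]
--     return ordered, ', '.join(ordered)
-- ===== SOURCE B (Python) =====
-- FREQUENCY_ORDER = ['Daily', 'Weekly', 'Monthly']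
-- SEPARATORS = set(',+&|/')
-- CANON = {'D': 'Daily', 'DAILY': 'Daily', 'W': 'Weekly', 'WEEKLY': 'Weekly',
--          'M': 'Monthly', 'MONTHLY': 'Monthly'}
--
-- def normalize_frequency_string(freq_str: str):
--     """Return (freq_list, display_str). Single character-level scan tokenizes on any
--     separator directly (no replace/split passes); dict.fromkeys dedups; a stable sort
--     by canonical rank orders known frequencies first, unknowns in insertion order."""
--     tokens = []
--     cur = []
--     for ch in (freq_str or '').strip() + ',':
--         if ch in SEPARATORS:
--             t = ''.join(cur).strip()
--             if t:
--                 tokens.append(t)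
--             cur = []
--         else:
--             cur.append(ch)
--     dedup = list(dict.fromkeys(
--         CANON.get(t.replace(' ', '').upper(), t.title()) for t in tokens))
--     order = sorted(dedup, key=lambda x: FREQUENCY_ORDER.index(x)
--                    if x in FREQUENCY_ORDER else len(FREQUENCY_ORDER))
--     return order, ', '.join(order)
-- ===== Notes on version B (the rewrite author's own statement) =====
-- stated objective: alternative
-- what changed: A runs four separator-replace passes, a comma split, a per-part strip, a map loop, a seen-set dedup loop and two final filter passes; B tokenizes with a single character-level scan that flushes on any separator, dedups via dict.fromkeys, and orders with one stable sort keyed by canonical rank instead of the two filter passes.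
import Mathlib
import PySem

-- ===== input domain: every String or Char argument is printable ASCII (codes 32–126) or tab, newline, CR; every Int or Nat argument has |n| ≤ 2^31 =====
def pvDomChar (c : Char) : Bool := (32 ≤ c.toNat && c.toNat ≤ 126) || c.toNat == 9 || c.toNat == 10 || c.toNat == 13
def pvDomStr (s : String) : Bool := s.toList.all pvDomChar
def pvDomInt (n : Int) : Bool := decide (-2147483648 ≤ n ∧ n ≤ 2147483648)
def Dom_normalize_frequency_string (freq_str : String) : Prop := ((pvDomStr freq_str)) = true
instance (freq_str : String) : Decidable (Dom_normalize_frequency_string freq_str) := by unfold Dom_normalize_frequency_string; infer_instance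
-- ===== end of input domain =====

-- B replaces A's four replace passes + split + per-part strip + seen-set dedup + two final
-- filter passes by ONE character-level scan that tokenizes on any separator directly,
-- dict.fromkeys dedup and a stable sort by canonical rank (objective: alternative algorithm).

-- shared helper: hand port of Python str.title(), exact on the ASCII domain
-- (word boundary = non-alphabetic character, which coincides with Python's "uncased"
-- boundary for ASCII text)
def pyTitleGo : List Char → Bool → List Char
  | [], _ => []
  | c :: cs, prevAlpha =>
    if PySem.Chars.isalpha c then
      (if prevAlpha then PySem.Chars.lowerChar c else PySem.Chars.upperChar c) :: pyTitleGo cs true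
    else c :: pyTitleGo cs false

def pyTitle (s : String) : String := String.ofList (pyTitleGo s.toList false)

def FREQUENCY_ORDER : List String := ["Daily", "Weekly", "Monthly"]

-- ===== PORT A =====
-- the per-part normalization of A's loop body (key computation + if-chain)
def pvMapItem (p : String) : String :=
  let key := PySem.Str.upper (PySem.Str.replace p " " "")
  if key = "D" ∨ key = "DAILY" then "Daily"
  else if key = "W" ∨ key = "WEEKLY" then "Weekly"
  else if key = "M" ∨ key = "MONTHLY" then "Monthly"
  else pyTitle p

def normalize_frequency_string (freq_str : String) : List String × String :=
  let raw := PySem.Str.strip freq_str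
  if raw = "" then ([], "")
  else
    let tmp := ["+", "&", "|", "/"].foldl (fun t sep => PySem.Str.replace t sep ",") raw
    -- tmp.split(',') ; ',' ≠ '' so split? always returns a value
    let parts := (((PySem.Str.split? tmp ",").getD []).map PySem.Str.strip).filter (fun p => p ≠ "")
    let mapped := parts.foldl (fun acc p => acc ++ [pvMapItem p]) []
    let sd := mapped.foldl
      (fun (st : PySem.Set String × List String) item =>
        if PySem.Set.contains st.1 item = false then (PySem.Set.add st.1 item, st.2 ++ [item])
        else st)
      (PySem.Set.empty, [])
    let dedup := sd.2
    let ordered := FREQUENCY_ORDER.filter (fun f => dedup.contains f)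
      ++ dedup.filter (fun f => FREQUENCY_ORDER.contains f = false)
    (ordered, PySem.Str.join ", " ordered)

-- ===== PORT B =====
-- SEPARATORS = set(',+&|/')
def pvSeps : List Char := [',', '+', '&', '|', '/']

-- CANON dict
def pvCANON : PySem.Dict String String := PySem.Dict.mk
  [("D","Daily"),("DAILY","Daily"),("W","Weekly"),("WEEKLY","Weekly"),("M","Monthly"),("MONTHLY","Monthly")]

-- the body of B's character loop: flush the current chunk on a separator, else extend it
def pvStep (st : List String × List Char) (ch : Char) : List String × List Char :=
  if pvSeps.contains ch then
    (let t := String.ofList (PySem.Chars.strip st.2)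
     (if t ≠ "" then st.1 ++ [t] else st.1, []))
  else (st.1, st.2 ++ [ch])

-- B's sort key: FREQUENCY_ORDER.index(x) if x in FREQUENCY_ORDER else len(FREQUENCY_ORDER)
def pvRank (x : String) : Nat :=
  if FREQUENCY_ORDER.contains x then (PySem.List.index? FREQUENCY_ORDER x).getD 0
  else FREQUENCY_ORDER.length

def normalize_frequency_string_alt (freq_str : String) : List String × String :=
  -- for ch in (freq_str or '').strip() + ',' : scan flushing tokens on separators
  let scan := (PySem.Chars.strip freq_str.toList ++ [',']).foldl pvStep ([], [])
  let tokens := scan.1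
  -- dedup = list(dict.fromkeys(CANON.get(..., t.title()) for t in tokens))
  let dedup := PySem.List.dedup (tokens.map (fun t =>
      (PySem.Dict.get? pvCANON (PySem.Str.upper (PySem.Str.replace t " " ""))).getD (pyTitle t)))
  -- order = sorted(dedup, key=rank)  (stable)
  let order := PySem.List.sorted dedup pvRank false
  (order, PySem.Str.join ", " order)

-- ===== PRECONDITION & SPEC =====
def Spec_normalize_frequency_string (freq_str : String) (out : List String × String) : Prop := out = normalize_frequency_string_alt freq_str
instance (freq_str : String) (out : List String × String) : Decidable (Spec_normalize_frequency_string freq_str out) := by unfold Spec_normalize_frequency_string; infer_instance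

-- ===== CLAIM (what is proved, stated in full; the proofs are below) =====
def Claim_equal_normalize_frequency_string : Prop := ∀ (freq_str : String), Dom_normalize_frequency_string freq_str → Spec_normalize_frequency_string freq_str (normalize_frequency_string freq_str)

-- ===== LEMMAS AND PROOFS =====

-- ---- generic string helpers ----
theorem ofList_eq_empty_iff (cs : List Char) : String.ofList cs = "" ↔ cs = [] := by
  constructor
  · intro h; have := congrArg String.toList h; simpa using this
  · intro h; simp [h]

theorem strip_ofList (cs : List Char) :
    PySem.Str.strip (String.ofList cs) = String.ofList (PySem.Chars.strip cs) := by
  have h1 : (PySem.Str.strip (String.ofList cs)).toList = PySem.Chars.strip cs := by simp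
  rw [← h1, String.ofList_toList]

-- ---- A's tokenization: replace chain + split + strip + filter ----
def pvSub (c : Char) : Char := if c = '+' ∨ c = '&' ∨ c = '|' ∨ c = '/' then ',' else c

def mySplit (pre : List Char) : List Char → List (List Char)
  | [] => [pre]
  | c :: t => if c = ',' then pre :: mySplit [] t else mySplit (pre ++ [c]) t

theorem replace_go_single (a b : Char) (l : List Char) (acc : List Char) (fuel : Nat) (h : l.length ≤ fuel) :
    PySem.Chars.replace.go [a] [b] fuel l acc = acc.reverse ++ l.map (fun c => if c = a then b else c) := by
  induction l generalizing fuel acc with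
  | nil => cases fuel <;> simp [PySem.Chars.replace.go]
  | cons c t ih =>
    cases fuel with
    | zero => simp at h
    | succ f =>
      simp only [PySem.Chars.replace.go, List.map]
      by_cases hc : c = a
      · rw [if_pos (by simp [List.isPrefixOf, hc])]
        simp only [List.length_nil, List.drop_zero, List.length_cons, List.drop_succ_cons]
        rw [ih _ _ (by simpa using h)]
        simp [hc]
      · rw [if_neg (by simp [List.isPrefixOf]; exact fun hh => absurd hh.symm hc)]
        rw [ih _ _ (by simpa using h)]
        simp [hc]

theorem replace_single (a b : Char) (cs : List Char) :
    PySem.Chars.replace cs [a] [b] = cs.map (fun c => if c = a then b else c) := by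
  simp only [PySem.Chars.replace, List.isEmpty]
  exact replace_go_single a b cs [] cs.length (le_refl _)

theorem splitOn_go_comma (l : List Char) (cur : List Char) (acc : List (List Char)) (fuel : Nat) (h : l.length ≤ fuel) :
    PySem.Chars.splitOn.go [','] fuel l cur acc = acc.reverse ++ mySplit cur.reverse l := by
  induction l generalizing fuel cur acc with
  | nil => cases fuel <;> simp [PySem.Chars.splitOn.go, mySplit]
  | cons c t ih =>
    cases fuel with
    | zero => simp at h
    | succ f =>
      simp only [PySem.Chars.splitOn.go]
      by_cases hc : c = ','
      · rw [if_pos (by simp [List.isPrefixOf, hc])]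
        simp only [List.length_nil, List.drop_zero, List.length_cons, List.drop_succ_cons, List.length_singleton]
        rw [ih _ _ _ (by simpa using h)]
        simp [mySplit, hc]
      · rw [if_neg (by simp [List.isPrefixOf]; exact fun hh => absurd hh.symm hc)]
        rw [ih _ _ _ (by simpa using h)]
        simp [mySplit, hc]

theorem splitOn_comma (cs : List Char) : PySem.Chars.splitOn cs [','] = mySplit [] cs := by
  simp only [PySem.Chars.splitOn]
  rw [splitOn_go_comma cs [] [] (cs.length + 1) (by omega)]
  simp

theorem tmp_toList (raw : String) :
    (["+", "&", "|", "/"].foldl (fun t sep => PySem.Str.replace t sep ",") raw).toList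
      = raw.toList.map pvSub := by
  simp only [List.foldl_cons, List.foldl_nil]
  simp only [PySem.Str.toList_replace]
  rw [show ("+" : String).toList = ['+'] from rfl, show ("&" : String).toList = ['&'] from rfl,
      show ("|" : String).toList = ['|'] from rfl, show ("/" : String).toList = ['/'] from rfl,
      show ("," : String).toList = [','] from rfl]
  rw [replace_single, replace_single, replace_single, replace_single]
  simp only [List.map_map]
  apply List.map_congr_left
  intro c _
  by_cases h1 : c = '+'; · subst h1; rfl
  by_cases h2 : c = '&'; · subst h2; rfl
  by_cases h3 : c = '|'; · subst h3; rfl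
  by_cases h4 : c = '/'; · subst h4; rfl
  simp [Function.comp, pvSub, h1, h2, h3, h4]

theorem parts_eq (raw : String) :
    ((((PySem.Str.split? (["+", "&", "|", "/"].foldl (fun t sep => PySem.Str.replace t sep ",") raw) ",").getD []).map PySem.Str.strip).filter (fun p => p ≠ ""))
      = (((mySplit [] (raw.toList.map pvSub)).map PySem.Chars.strip).filter (fun p => p ≠ [])).map String.ofList := by
  have hsplit : PySem.Str.split? (["+", "&", "|", "/"].foldl (fun t sep => PySem.Str.replace t sep ",") raw) ","
      = some ((mySplit [] (raw.toList.map pvSub)).map String.ofList) := by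
    simp only [PySem.Str.split?, PySem.Chars.split?,
      show ("," : String).toList = [','] from rfl, List.isEmpty_cons, Bool.false_eq_true,
      if_false, Option.map_some]
    rw [tmp_toList, splitOn_comma]
  rw [hsplit, Option.getD_some]
  rw [List.map_map, show PySem.Str.strip ∘ String.ofList = String.ofList ∘ PySem.Chars.strip from
        funext (fun cs => strip_ofList cs)]
  rw [← List.map_map, List.filter_map]
  exact congrArg (List.map String.ofList)
    (List.filter_congr (fun p _ => by simp [Function.comp, ofList_eq_empty_iff]))

-- ---- B's scanner computes the same token list ----
theorem scan_eq (l : List Char) (toks : List String) (cur : List Char) :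
    (List.foldl pvStep (toks, cur) (l ++ [','])).1
      = toks ++ (((mySplit cur (l.map pvSub)).map PySem.Chars.strip).filter
          (fun p => p ≠ [])).map String.ofList := by
  induction l generalizing toks cur with
  | nil =>
    simp only [List.map_nil, List.nil_append, List.foldl_cons, List.foldl_nil, mySplit]
    by_cases h : PySem.Chars.strip cur = []
    · simp [pvStep, pvSeps, h, ofList_eq_empty_iff]
    · simp [pvStep, pvSeps, h, List.filter, ofList_eq_empty_iff]
  | cons c t ih =>
    simp only [List.map_cons, List.cons_append, List.foldl_cons]
    by_cases hc : pvSeps.contains c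
    · have hmem : c = ',' ∨ c = '+' ∨ c = '&' ∨ c = '|' ∨ c = '/' := by
        simpa [pvSeps] using hc
      have hsub : pvSub c = ',' := by
        rcases hmem with h|h|h|h|h <;> simp [pvSub, h]
      have hc' : c ∈ pvSeps := by simpa using hc
      rw [show pvStep (toks, cur) c
            = (if String.ofList (PySem.Chars.strip cur) ≠ "" then toks ++ [String.ofList (PySem.Chars.strip cur)] else toks, [])
          from by simp [pvStep, hc']]
      rw [ih]
      simp only [hsub, mySplit, if_pos rfl, List.map_cons, List.filter_cons]
      by_cases h : PySem.Chars.strip cur = []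
      · simp [h, ofList_eq_empty_iff]
      · simp [h, ofList_eq_empty_iff]
    · have hmem : ¬ (c = ',' ∨ c = '+' ∨ c = '&' ∨ c = '|' ∨ c = '/') := by
        simpa [pvSeps] using hc
      have hsub : pvSub c = c := by simp [pvSub]; intro h; exact absurd (Or.inr h) hmem
      have hc' : c ∉ pvSeps := by simpa using hc
      rw [show pvStep (toks, cur) c = (toks, cur ++ [c]) from by simp [pvStep, hc']]
      rw [ih]
      simp only [hsub, mySplit]
      rw [if_neg (fun hh => hmem (Or.inl hh))]

-- ---- mapping: CANON lookup = A's if-chain ----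
theorem canon_eq (t : String) :
    (PySem.Dict.get? pvCANON (PySem.Str.upper (PySem.Str.replace t " " ""))).getD (pyTitle t)
      = pvMapItem t := by
  set key := PySem.Str.upper (PySem.Str.replace t " " "") with hkey
  show (PySem.Dict.get? pvCANON key).getD (pyTitle t)
      = (if key = "D" ∨ key = "DAILY" then "Daily"
         else if key = "W" ∨ key = "WEEKLY" then "Weekly"
         else if key = "M" ∨ key = "MONTHLY" then "Monthly"
         else pyTitle t)
  clear_value key
  by_cases h1 : key = "D"; · subst h1; simp [pvCANON, PySem.Dict.get?]
  by_cases h2 : key = "DAILY"; · subst h2; simp [pvCANON, PySem.Dict.get?]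
  by_cases h3 : key = "W"; · subst h3; simp [pvCANON, PySem.Dict.get?, List.find?]
  by_cases h4 : key = "WEEKLY"; · subst h4; simp [pvCANON, PySem.Dict.get?, List.find?]
  by_cases h5 : key = "M"; · subst h5; simp [pvCANON, PySem.Dict.get?, List.find?]
  by_cases h6 : key = "MONTHLY"; · subst h6; simp [pvCANON, PySem.Dict.get?, List.find?]
  have g : ∀ s : String, s ≠ key → (s == key) = false := by
    intro s hs; simp [beq_iff_eq]; exact hs
  have hnone : PySem.Dict.get? pvCANON key = none := by
    simp [PySem.Dict.get?, pvCANON, List.find?,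
      g _ (fun hh => h1 hh.symm), g _ (fun hh => h2 hh.symm), g _ (fun hh => h3 hh.symm),
      g _ (fun hh => h4 hh.symm), g _ (fun hh => h5 hh.symm), g _ (fun hh => h6 hh.symm)]
  simp [hnone, h1, h2, h3, h4, h5, h6]

-- ---- A's dedup loop ----
theorem contains_iff_mem (s : PySem.Set String) (x : String) :
    PySem.Set.contains s x = true ↔ x ∈ s := by
  simp [PySem.Set.contains]

theorem a_fold_eq (m : List String) (s : PySem.Set String) :
    m.foldl
      (fun (st : PySem.Set String × List String) item =>
        if PySem.Set.contains st.1 item = false then (PySem.Set.add st.1 item, st.2 ++ [item])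
        else st) (s, s)
      = (PySem.Set.update s m, PySem.Set.update s m) := by
  induction m generalizing s with
  | nil => simp [PySem.Set.update]
  | cons x m ih =>
    simp only [List.foldl_cons, PySem.Set.update] at *
    by_cases h : x ∈ s
    · have hct : PySem.Set.contains s x = true := (contains_iff_mem s x).2 h
      have hadd : PySem.Set.add s x = s := by rw [PySem.Set.add, if_pos hct]
      rw [if_neg (fun hh => absurd (hct ▸ hh) (by decide)), hadd]
      exact ih s
    · have hct : ¬ PySem.Set.contains s x = true := fun hh => h ((contains_iff_mem s x).1 hh)
      have hcf : PySem.Set.contains s x = false := by simpa using hct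
      have hadd : PySem.Set.add s x = s ++ [x] := by rw [PySem.Set.add, if_neg hct]
      rw [if_pos hcf, hadd]
      exact ih (s ++ [x])

theorem a_fold_eq0 (m : List String) :
    m.foldl
      (fun (st : PySem.Set String × List String) item =>
        if PySem.Set.contains st.1 item = false then (PySem.Set.add st.1 item, st.2 ++ [item])
        else st) (PySem.Set.empty, [])
      = (PySem.Set.ofList m, PySem.Set.ofList m) := by
  exact (a_fold_eq m PySem.Set.empty).trans
    (by rw [show PySem.Set.update PySem.Set.empty m = PySem.Set.ofList m from PySem.Set.update_nil_left m])

-- ---- the sort key ----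
theorem pvRank_known (x : String) (h : FREQUENCY_ORDER.contains x) :
    x = "Daily" ∨ x = "Weekly" ∨ x = "Monthly" := by simpa [FREQUENCY_ORDER] using h

theorem pvRank_eq_zero (x : String) : pvRank x = 0 ↔ x = "Daily" := by
  by_cases h : FREQUENCY_ORDER.contains x
  · rcases pvRank_known x h with h'|h'|h' <;> subst h' <;> simp [pvRank] <;> decide
  · have hD : x ≠ "Daily" := by rintro rfl; exact h (by decide)
    have hW : x ≠ "Weekly" := by rintro rfl; exact h (by decide)
    have hM : x ≠ "Monthly" := by rintro rfl; exact h (by decide)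
    simp [pvRank, FREQUENCY_ORDER, hD, hW, hM]

theorem pvRank_eq_one (x : String) : pvRank x = 1 ↔ x = "Weekly" := by
  by_cases h : FREQUENCY_ORDER.contains x
  · rcases pvRank_known x h with h'|h'|h' <;> subst h' <;> simp [pvRank] <;> decide
  · have hD : x ≠ "Daily" := by rintro rfl; exact h (by decide)
    have hW : x ≠ "Weekly" := by rintro rfl; exact h (by decide)
    have hM : x ≠ "Monthly" := by rintro rfl; exact h (by decide)
    simp [pvRank, FREQUENCY_ORDER, hD, hW, hM]

theorem pvRank_eq_two (x : String) : pvRank x = 2 ↔ x = "Monthly" := by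
  by_cases h : FREQUENCY_ORDER.contains x
  · rcases pvRank_known x h with h'|h'|h' <;> subst h' <;> simp [pvRank] <;> decide
  · have hD : x ≠ "Daily" := by rintro rfl; exact h (by decide)
    have hW : x ≠ "Weekly" := by rintro rfl; exact h (by decide)
    have hM : x ≠ "Monthly" := by rintro rfl; exact h (by decide)
    simp [pvRank, FREQUENCY_ORDER, hD, hW, hM]

theorem pvRank_eq_three (x : String) : pvRank x = 3 ↔ FREQUENCY_ORDER.contains x = false := by
  by_cases h : FREQUENCY_ORDER.contains x
  · rcases pvRank_known x h with h'|h'|h' <;> subst h' <;> simp [h] <;> decide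
  · have hD : x ≠ "Daily" := by rintro rfl; exact h (by decide)
    have hW : x ≠ "Weekly" := by rintro rfl; exact h (by decide)
    have hM : x ≠ "Monthly" := by rintro rfl; exact h (by decide)
    simp only [Bool.not_eq_true] at h
    simp [pvRank, FREQUENCY_ORDER, hD, hW, hM, h]

theorem pvRank_le (x : String) : pvRank x ≤ 3 := by
  by_cases h : FREQUENCY_ORDER.contains x
  · rcases pvRank_known x h with h'|h'|h' <;> subst h' <;> decide
  · have hD : x ≠ "Daily" := by rintro rfl; exact h (by decide)
    have hW : x ≠ "Weekly" := by rintro rfl; exact h (by decide)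
    have hM : x ≠ "Monthly" := by rintro rfl; exact h (by decide)
    simp [pvRank, FREQUENCY_ORDER, hD, hW, hM]

-- ---- stable-sort bucketing ----
theorem insertBy_append_left {α : Type} (before : α → α → Bool) (x : α) (pre suf : List α)
    (h : ∀ y ∈ pre, before x y = false) :
    PySem.List.insertBy before x (pre ++ suf) = pre ++ PySem.List.insertBy before x suf := by
  induction pre with
  | nil => simp
  | cons y ys ih =>
    simp only [List.cons_append, PySem.List.insertBy]
    rw [if_neg (by simp [h y (by simp)])]
    have := ih (fun z hz => h z (by simp [hz]))
    cases hys : ys ++ suf with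
    | nil =>
      cases ys with
      | nil => cases suf with
        | nil => simp [PySem.List.insertBy]
        | cons a b => simp at hys
      | cons a b => simp at hys
    | cons a b =>
      rw [hys] at this
      simp only [PySem.List.insertBy] at this ⊢
      rw [this]

theorem insertBy_of_all_before {α : Type} (before : α → α → Bool) (x : α) (suf : List α)
    (h : ∀ y ∈ suf, before x y = true) :
    PySem.List.insertBy before x suf = x :: suf := by
  cases suf with
  | nil => rfl
  | cons y ys => simp only [PySem.List.insertBy]; rw [if_pos (h y (by simp))]

theorem sorted_bucket (xs : List String) (key : String → Nat) (hk : ∀ x, key x ≤ 3) :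
    PySem.List.sorted xs key false
      = xs.filter (fun x => key x = 0) ++ xs.filter (fun x => key x = 1)
        ++ xs.filter (fun x => key x = 2) ++ xs.filter (fun x => key x = 3) := by
  induction xs using List.reverseRecOn with
  | nil => rfl
  | append_singleton l x ih =>
    rw [PySem.List.sorted_eq_foldl_insertBy] at *
    rw [List.foldl_append, List.foldl_cons, List.foldl_nil, ih]
    simp only [List.filter_append, List.filter_cons, List.filter_nil]
    have mem_bucket : ∀ (i : Nat) (y : String), y ∈ l.filter (fun z => decide (key z = i)) → key y = i := by
      intro i y hy; simpa using (List.mem_filter.1 hy).2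
    have hx3 : key x ≤ 3 := hk x
    set b := fun a c => decide (key a < key c) with hb
    have hbf : ∀ y, key y ≤ key x → b x y = false := by intro y hy; simp [hb]; omega
    have hbt : ∀ y, key x < key y → b x y = true := by intro y hy; simp [hb, hy]
    set F0 := l.filter (fun z => decide (key z = 0))
    set F1 := l.filter (fun z => decide (key z = 1))
    set F2 := l.filter (fun z => decide (key z = 2))
    set F3 := l.filter (fun z => decide (key z = 3))
    interval_cases h : (key x)
    · rw [show F0 ++ F1 ++ F2 ++ F3 = F0 ++ (F1 ++ F2 ++ F3) by simp [List.append_assoc]]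
      rw [insertBy_append_left _ _ _ _ (fun y hy => hbf y (by have := mem_bucket 0 y hy; omega)),
          insertBy_of_all_before _ _ _ (fun y hy => hbt y (by
            rcases List.mem_append.1 hy with hy' | hy'
            · rcases List.mem_append.1 hy' with hy'' | hy''
              · have := mem_bucket 1 y hy''; omega
              · have := mem_bucket 2 y hy''; omega
            · have := mem_bucket 3 y hy'; omega))]
      simp [List.append_assoc]
    · rw [show F0 ++ F1 ++ F2 ++ F3 = (F0 ++ F1) ++ (F2 ++ F3) by simp [List.append_assoc]]
      rw [insertBy_append_left _ _ _ _ (fun y hy => hbf y (by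
            rcases List.mem_append.1 hy with hy' | hy'
            · have := mem_bucket 0 y hy'; omega
            · have := mem_bucket 1 y hy'; omega)),
          insertBy_of_all_before _ _ _ (fun y hy => hbt y (by
            rcases List.mem_append.1 hy with hy' | hy'
            · have := mem_bucket 2 y hy'; omega
            · have := mem_bucket 3 y hy'; omega))]
      simp [List.append_assoc]
    · rw [show F0 ++ F1 ++ F2 ++ F3 = (F0 ++ F1 ++ F2) ++ F3 by simp [List.append_assoc]]
      rw [insertBy_append_left _ _ _ _ (fun y hy => hbf y (by
            rcases List.mem_append.1 hy with hy' | hy'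
            · rcases List.mem_append.1 hy' with hy'' | hy''
              · have := mem_bucket 0 y hy''; omega
              · have := mem_bucket 1 y hy''; omega
            · have := mem_bucket 2 y hy'; omega)),
          insertBy_of_all_before _ _ _ (fun y hy => hbt y (by have := mem_bucket 3 y hy; omega))]
      simp [List.append_assoc]
    · rw [insertBy_append_left _ _ (F0 ++ F1 ++ F2) F3 (fun y hy => hbf y (by
            rcases List.mem_append.1 hy with hy' | hy'
            · rcases List.mem_append.1 hy' with hy'' | hy''
              · have := mem_bucket 0 y hy''; omega
              · have := mem_bucket 1 y hy''; omega
            · have := mem_bucket 2 y hy'; omega))]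
      rw [PySem.List.insertBy_of_forall_not_before _ _ _ (fun y hy => hbf y (by
            have := mem_bucket 3 y hy; omega))]
      simp [List.append_assoc]

-- ---- the two orderings coincide on a duplicate-free list ----
theorem nodup_filter_eq (l : List String) (a : String) (h : l.Nodup) :
    l.filter (fun y => decide (y = a)) = if a ∈ l then [a] else [] := by
  induction l with
  | nil => simp
  | cons b t ih =>
    rcases List.nodup_cons.1 h with ⟨hb, ht⟩
    by_cases hba : b = a
    · subst hba
      rw [List.filter_cons_of_pos (by simp)]
      rw [List.filter_eq_nil_iff.2 (fun y hy => by simp; rintro rfl; exact hb hy)]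
      rw [if_pos (List.mem_cons_self ..)]
    · rw [List.filter_cons_of_neg (by simp [hba])]
      rw [ih ht]
      by_cases hat : a ∈ t
      · rw [if_pos hat, if_pos (List.mem_cons_of_mem b hat)]
      · rw [if_neg hat, if_neg (by simp [List.mem_cons, hat]; exact fun hh => hba hh.symm)]

theorem order_eq (d : List String) (hnd : d.Nodup) :
    PySem.List.sorted d pvRank false
      = FREQUENCY_ORDER.filter (fun f => d.contains f)
        ++ d.filter (fun f => FREQUENCY_ORDER.contains f = false) := by
  rw [sorted_bucket d pvRank pvRank_le]
  have f0 : d.filter (fun x => decide (pvRank x = 0)) = if "Daily" ∈ d then ["Daily"] else [] := by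
    rw [List.filter_congr (fun x _ => by simp [pvRank_eq_zero] : ∀ x ∈ d, (decide (pvRank x = 0)) = (decide (x = "Daily")))]
    exact nodup_filter_eq d _ hnd
  have f1 : d.filter (fun x => decide (pvRank x = 1)) = if "Weekly" ∈ d then ["Weekly"] else [] := by
    rw [List.filter_congr (fun x _ => by simp [pvRank_eq_one] : ∀ x ∈ d, (decide (pvRank x = 1)) = (decide (x = "Weekly")))]
    exact nodup_filter_eq d _ hnd
  have f2 : d.filter (fun x => decide (pvRank x = 2)) = if "Monthly" ∈ d then ["Monthly"] else [] := by
    rw [List.filter_congr (fun x _ => by simp [pvRank_eq_two] : ∀ x ∈ d, (decide (pvRank x = 2)) = (decide (x = "Monthly")))]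
    exact nodup_filter_eq d _ hnd
  have f3 : d.filter (fun x => decide (pvRank x = 3)) = d.filter (fun f => FREQUENCY_ORDER.contains f = false) := by
    apply List.filter_congr
    intro x _
    simp [pvRank_eq_three]
  have hfreq : FREQUENCY_ORDER.filter (fun f => d.contains f)
      = (if "Daily" ∈ d then ["Daily"] else []) ++ (if "Weekly" ∈ d then ["Weekly"] else [])
        ++ (if "Monthly" ∈ d then ["Monthly"] else []) := by
    by_cases hd : "Daily" ∈ d <;> by_cases hw : "Weekly" ∈ d <;> by_cases hm : "Monthly" ∈ d <;>
      simp [FREQUENCY_ORDER, List.filter, hd, hw, hm]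
  rw [f0, f1, f2, f3, hfreq]

-- ===== VERDICT (by name: the statement is the Claim_ definition above) =====
theorem normalize_frequency_string_spec : Claim_equal_normalize_frequency_string := by
  intro freq_str _
  simp only [Spec_normalize_frequency_string, normalize_frequency_string, normalize_frequency_string_alt]
  by_cases hE : PySem.Chars.strip freq_str.toList = []
  · have hA : PySem.Str.strip freq_str = "" := by
      rw [← String.toList_eq_nil_iff]
      simpa using hE
    rw [if_pos hA, hE]
    rfl
  · have hA : ¬ PySem.Str.strip freq_str = "" := by
      rw [← String.toList_eq_nil_iff]
      simpa using hE
    rw [if_neg hA]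
    -- tokens = parts
    have htok : (List.foldl pvStep ([], []) (PySem.Chars.strip freq_str.toList ++ [','])).1
        = ((((PySem.Str.split? (["+", "&", "|", "/"].foldl (fun t sep => PySem.Str.replace t sep ",") (PySem.Str.strip freq_str)) ",").getD []).map PySem.Str.strip).filter (fun p => p ≠ "")) := by
      rw [scan_eq, parts_eq]
      simp
    rw [htok]
    set parts := ((((PySem.Str.split? (["+", "&", "|", "/"].foldl (fun t sep => PySem.Str.replace t sep ",") (PySem.Str.strip freq_str)) ",").getD []).map PySem.Str.strip).filter (fun p => p ≠ "")) with hparts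
    clear_value parts
    -- mapped lists coincide
    rw [show parts.map (fun t =>
          (PySem.Dict.get? pvCANON (PySem.Str.upper (PySem.Str.replace t " " ""))).getD (pyTitle t))
        = parts.map pvMapItem from List.map_congr_left (fun t _ => canon_eq t)]
    rw [PySem.List.foldl_append_singleton_eq_map, List.nil_append]
    set m := parts.map pvMapItem with hm
    clear_value m
    rw [a_fold_eq0 m, PySem.List.dedup_eq_ofList]
    exact congrArg (fun o => (o, PySem.Str.join ", " o))
      (order_eq (PySem.Set.ofList m) (PySem.Set.nodup_ofList m)).symm
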